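-- pv_equiv track=rewrite | github.com/lusia-ai/tender-processing | agent/pdf_agent/parsing/chunker.py | _take_overlap
-- ===== SOURCE A (Python) =====
-- from typing import Callable, Iterable, List, Optional, Tuple
--
-- def _take_overlap(words: List[str], overlap: int) -> List[str]:
--     """Take trailing words until reaching overlap chars."""
--     acc: List[str] = []
--     total = 0
--     for word in reversed(words):
--         add_len = len(word) + (1 if acc else 0)
--         if total + add_len > overlap:
--             break
--         acc.append(word)
--         total += add_len
--     return list(reversed(acc))
-- ===== SOURCE B (Python) =====
-- def _take_overlap(words, overlap):
--     """Take trailing words until reaching overlap chars.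
--
--     Build the table of cumulative joined lengths of the k-word suffixes
--     (costs[k] = sum of the last k word lengths + (k-1) spaces), locate the
--     largest k whose cost fits in the budget, and return the suffix slice.
--     """
--     costs = [0]
--     for w in reversed(words):
--         costs.append(costs[-1] + len(w) + (1 if len(costs) > 1 else 0))
--     k = 0
--     for c in costs[1:]:
--         if c > overlap:
--             break
--         k += 1
--     return words[len(words) - k:]
-- ===== Notes on version B (the rewrite author's own statement) =====
-- stated objective: alternative
-- what changed: Replaces the incremental accumulate-then-reverse loop (building an acc list of words and reversing it) with a precomputed table of cumulative suffix costs followed by a cutoff scan and a single slice of the input.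
import Mathlib
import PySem

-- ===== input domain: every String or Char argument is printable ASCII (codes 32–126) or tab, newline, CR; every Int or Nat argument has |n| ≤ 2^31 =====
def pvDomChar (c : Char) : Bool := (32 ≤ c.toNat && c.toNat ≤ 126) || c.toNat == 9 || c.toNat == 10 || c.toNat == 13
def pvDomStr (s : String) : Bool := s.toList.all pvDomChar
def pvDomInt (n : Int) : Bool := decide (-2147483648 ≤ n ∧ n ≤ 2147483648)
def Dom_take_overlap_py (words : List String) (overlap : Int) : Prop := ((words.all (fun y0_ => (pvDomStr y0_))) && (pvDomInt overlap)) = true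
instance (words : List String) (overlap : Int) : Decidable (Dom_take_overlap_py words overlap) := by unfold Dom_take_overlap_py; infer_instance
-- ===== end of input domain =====

-- B replaces A's accumulate-then-reverse loop by a cumulative suffix-cost table,
-- a cutoff scan, and one slice of the input (alternative decomposition, same cost).

-- ===== PORT A =====
-- the for-loop over reversed(words) with its break, carrying (acc, total)
def takeOverlapLoopA (overlap : Int) : List String → List String → Int → List String
  | [], acc, _ => acc
  | w :: ws, acc, total =>
    let add := PySem.Str.len w + (if acc.isEmpty then 0 else 1)
    if total + add > overlap then acc
    else takeOverlapLoopA overlap ws (acc ++ [w]) (total + add)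

def take_overlap_py (words : List String) (overlap : Int) : List String :=
  (takeOverlapLoopA overlap words.reverse [] 0).reverse

-- ===== PORT B =====
-- first loop of Source B: extend the costs table once per word of reversed(words)
def altBuildCosts : List String → List Int → List Int
  | [], costs => costs
  | w :: ws, costs =>
      altBuildCosts ws
        (costs ++ [costs.getLast! + PySem.Str.len w + (if costs.length > 1 then 1 else 0)])

-- second loop of Source B: count entries of costs[1:] until one exceeds overlap
def altCutoff (overlap : Int) : List Int → Nat
  | [] => 0
  | c :: cs => if c > overlap then 0 else 1 + altCutoff overlap cs

def take_overlap_py_alt (words : List String) (overlap : Int) : List String :=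
  let costs := altBuildCosts words.reverse [0]
  let k := altCutoff overlap (costs.drop 1)
  words.drop (words.length - k)

-- ===== PRECONDITION & SPEC =====
def Spec_take_overlap_py (words : List String) (overlap : Int) (out : List String) : Prop := out = take_overlap_py_alt words overlap
instance (words : List String) (overlap : Int) (out : List String) : Decidable (Spec_take_overlap_py words overlap out) := by unfold Spec_take_overlap_py; infer_instance

-- ===== CLAIM (what is proved, stated in full; the proofs are below) =====
def Claim_equal_take_overlap_py : Prop := ∀ (words : List String) (overlap : Int), Dom_take_overlap_py words overlap → Spec_take_overlap_py words overlap (take_overlap_py words overlap)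

-- ===== LEMMAS AND PROOFS =====

-- common yardstick: how many words of ws (a reversed tail) A takes, given the running
-- total and whether the accumulator is still empty
def takeCnt (overlap : Int) : List String → Int → Bool → Nat
  | [], _, _ => 0
  | w :: ws, total, first =>
    let add := PySem.Str.len w + (if first then 0 else 1)
    if total + add > overlap then 0 else 1 + takeCnt overlap ws (total + add) false

-- structured mirror of the costs tail that altBuildCosts appends
def costsTail : List String → Int → Bool → List Int
  | [], _, _ => []
  | w :: ws, last, first =>
    let c := last + PySem.Str.len w + (if first then 0 else 1)
    c :: costsTail ws c false

theorem takeOverlapLoopA_eq (overlap : Int) (ws acc : List String) (total : Int) :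
    takeOverlapLoopA overlap ws acc total
      = acc ++ ws.take (takeCnt overlap ws total acc.isEmpty) := by
  induction ws generalizing acc total with
  | nil => simp [takeOverlapLoopA, takeCnt]
  | cons w ws ih =>
    simp only [takeOverlapLoopA, takeCnt]
    split_ifs with h1 h2 h3
    · simp
    · rw [ih, show (acc ++ [w]).isEmpty = false by simp]; simp [Nat.one_add, List.append_assoc]
    · simp
    · rw [ih, show (acc ++ [w]).isEmpty = false by simp]; simp [Nat.one_add, List.append_assoc]

theorem altBuildCosts_eq (ws : List String) (costs : List Int) (h : costs ≠ []) :
    altBuildCosts ws costs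
      = costs ++ costsTail ws costs.getLast! (decide (costs.length ≤ 1)) := by
  induction ws generalizing costs with
  | nil => simp [altBuildCosts, costsTail]
  | cons w ws ih =>
    simp only [altBuildCosts]
    set c := costs.getLast! + PySem.Str.len w + (if costs.length > 1 then 1 else 0) with hc
    rw [ih (costs ++ [c]) (by simp)]
    simp only [costsTail]
    have h1 : (costs ++ [c]).getLast! = c := by
      rw [List.getLast!_eq_getLast?_getD]; simp
    have h2 : decide ((costs ++ [c]).length ≤ 1) = false := by
      have : 1 ≤ costs.length := List.length_pos_iff.mpr h
      simp [List.length_append]; omega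
    rw [h1, h2]
    have h3 : costs.getLast! + PySem.Str.len w + (if decide (costs.length ≤ 1) = true then 0 else 1) = c := by
      rw [hc]
      by_cases hl : costs.length ≤ 1
      · have : ¬ costs.length > 1 := by omega
        simp [hl, this]
      · have : costs.length > 1 := by omega
        simp [hl, this]
    rw [h3]
    simp

theorem altCutoff_costsTail (overlap : Int) (ws : List String) (total : Int) (first : Bool) :
    altCutoff overlap (costsTail ws total first) = takeCnt overlap ws total first := by
  induction ws generalizing total first with
  | nil => simp [costsTail, altCutoff, takeCnt]
  | cons w ws ih =>
    simp only [costsTail, altCutoff, takeCnt, add_assoc]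
    split_ifs <;> first | rfl | rw [ih]

theorem take_overlap_eq (words : List String) (overlap : Int) :
    take_overlap_py words overlap = take_overlap_py_alt words overlap := by
  unfold take_overlap_py take_overlap_py_alt
  dsimp only
  rw [takeOverlapLoopA_eq, altBuildCosts_eq _ _ (by simp)]
  have e1 : ([0] : List Int).getLast! = 0 := rfl
  have e2 : (decide (([0] : List Int).length ≤ 1)) = true := rfl
  rw [e1, e2]
  have e3 : (([0] : List Int) ++ costsTail words.reverse 0 true).drop 1
      = costsTail words.reverse 0 true := rfl
  rw [e3, altCutoff_costsTail]
  simp only [List.nil_append, List.isEmpty_nil]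
  rw [List.reverse_take]
  simp

-- ===== VERDICT (by name: the statement is the Claim_ definition above) =====
theorem take_overlap_py_spec : Claim_equal_take_overlap_py := by
  intro words overlap _
  unfold Spec_take_overlap_py
  exact take_overlap_eq words overlap
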